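-- pv_equiv track=rewrite | github.com/foxtailer/learn | algs__and_ds/PPI/nearest_greater.py | find_sum_of_nearest_ge
-- ===== SOURCE A (Python) =====
-- def find_sum_of_nearest_ge(nums):
--     n = len(nums)
--     stack = []
--     left_greaters = [-1]*n
--     right_greaters = [-1]*n
--     sum_greater = 0
--
--     # Calculate the mearest greater elenents on the legt side
--     for i in range(n):
--         while stack and nums[stack[-1]] <= nums[i]:
--             stack.pop()
--         if stack:
--             left_greaters[i] = nums[stack[-1]]
--         stack.append(i)
--
--     # Clear the stack and calculate the nearest greater elenemts on the right side
--     stack.clear()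
--     for i in range(n -1, -1, -1):
--         while stack and nums[stack[-1]] <= nums[i]:
--             stack.pop()
--         if stack:
--             right_greaters[i] = nums[stack[-1]]
--         stack.append(i)
--
--     # Calculate the sum of the rearest greater elenemts for each element
--     for i in range(n):
--         sum_greater += left_greaters[i] + right_greaters[i]
--
--     return sum_greater
-- ===== SOURCE B (Python) =====
-- def find_sum_of_nearest_ge(nums):
--     n = len(nums)
--     total = 0
--     for i in range(n):
--         v = nums[i]
--         left = -1
--         for j in range(i - 1, -1, -1):
--             if nums[j] > v:
--                 left = nums[j]
--                 break
--         right = -1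
--         for j in range(i + 1, n):
--             if nums[j] > v:
--                 right = nums[j]
--                 break
--         total += left + right
--     return total
-- ===== Notes on version B (the rewrite author's own statement) =====
-- stated objective: simpler
-- what changed: Replaced the two monotonic-stack passes plus two result arrays and a summing pass with a single loop that, for each index, directly scans left and right for the first strictly greater element.
import Mathlib
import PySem

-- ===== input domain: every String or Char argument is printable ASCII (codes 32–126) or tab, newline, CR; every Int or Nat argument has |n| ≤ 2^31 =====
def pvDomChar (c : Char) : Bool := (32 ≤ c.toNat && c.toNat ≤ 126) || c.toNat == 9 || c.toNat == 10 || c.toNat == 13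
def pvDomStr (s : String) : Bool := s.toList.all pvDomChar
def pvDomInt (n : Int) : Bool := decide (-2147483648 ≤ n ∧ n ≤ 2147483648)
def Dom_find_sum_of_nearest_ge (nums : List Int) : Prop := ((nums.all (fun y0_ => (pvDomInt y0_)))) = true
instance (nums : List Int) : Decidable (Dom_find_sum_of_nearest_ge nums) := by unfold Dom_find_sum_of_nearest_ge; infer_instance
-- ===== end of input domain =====

-- B replaces A's monotonic-stack passes with direct per-index left/right scans for
-- the first strictly greater element: simpler (shorter, plainer), not faster.

-- ===== PORT A =====
-- Stack is a list of indices with the TOP at the HEAD (Python append/pop at the end).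
-- All indices pushed/read are provably in range, so indexing is ported as `List.getD`.

-- the inner `while stack and nums[stack[-1]] <= nums[i]: stack.pop()` loop
def pvPop (nums : List Int) (v : Int) (stack : List Nat) : List Nat :=
  match stack with
  | [] => []
  | j :: rest => if nums.getD j 0 ≤ v then pvPop nums v rest else j :: rest

-- `if stack: …[i] = nums[stack[-1]]`, with the `-1` preset of the result array
def pvTopVal (nums : List Int) (stack : List Nat) : Int :=
  match stack with
  | [] => -1
  | j :: _ => nums.getD j 0

-- body of `for i in range(n)`: pop, record left_greaters[i] (appended in i-order), push i
def pvLeftStep (nums : List Int) (st : List Nat × List Int) (i : Nat) : List Nat × List Int :=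
  let s := pvPop nums (nums.getD i 0) st.1
  (i :: s, st.2 ++ [pvTopVal nums s])

-- body of `for i in range(n-1, -1, -1)`: results are consed so they end up in i-order
def pvRightStep (nums : List Int) (st : List Nat × List Int) (i : Nat) : List Nat × List Int :=
  let s := pvPop nums (nums.getD i 0) st.1
  (i :: s, pvTopVal nums s :: st.2)

def find_sum_of_nearest_ge (nums : List Int) : Int :=
  let n := nums.length
  let left_greaters := ((List.range n).foldl (pvLeftStep nums) ([], [])).2
  let right_greaters := (((List.range n).reverse).foldl (pvRightStep nums) ([], [])).2
  (List.zipWith (· + ·) left_greaters right_greaters).foldl (· + ·) 0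

-- ===== PORT B =====
-- `for j in range(i-1,-1,-1): if nums[j] > v: …; break` is ported as a first-match
-- scan over the reversed prefix (it visits exactly nums[i-1], …, nums[0] in order);
-- the rightward loop scans the suffix nums[i+1:], default -1.
def pvScanFirst (v : Int) (xs : List Int) : Int :=
  match xs with
  | [] => -1
  | x :: t => if x > v then x else pvScanFirst v t

def find_sum_of_nearest_ge_alt (nums : List Int) : Int :=
  (List.range nums.length).foldl (fun total i =>
    let v := nums.getD i 0
    total + (pvScanFirst v ((nums.take i).reverse) + pvScanFirst v (nums.drop (i + 1)))) 0

-- ===== PRECONDITION & SPEC =====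
def Spec_find_sum_of_nearest_ge (nums : List Int) (out : Int) : Prop := out = find_sum_of_nearest_ge_alt nums
instance (nums : List Int) (out : Int) : Decidable (Spec_find_sum_of_nearest_ge nums out) := by unfold Spec_find_sum_of_nearest_ge; infer_instance

-- ===== CLAIM (what is proved, stated in full; the proofs are below) =====
def Claim_equal_find_sum_of_nearest_ge : Prop := ∀ (nums : List Int), Dom_find_sum_of_nearest_ge nums → Spec_find_sum_of_nearest_ge nums (find_sum_of_nearest_ge nums)

-- ===== LEMMAS AND PROOFS =====

-- scanning the stack's values for the first one > v
def pvScanIdx (nums : List Int) (v : Int) (stack : List Nat) : Int :=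
  pvScanFirst v (stack.map (fun j => nums.getD j 0))

lemma pvScanFirst_cons (v x : Int) (t : List Int) :
    pvScanFirst v (x :: t) = if x > v then x else pvScanFirst v t := rfl

lemma pvScanIdx_cons (nums : List Int) (v : Int) (j : Nat) (s : List Nat) :
    pvScanIdx nums v (j :: s) =
      if nums.getD j 0 > v then nums.getD j 0 else pvScanIdx nums v s := rfl

lemma pvPop_cons (nums : List Int) (v : Int) (j : Nat) (rest : List Nat) :
    pvPop nums v (j :: rest) =
      if nums.getD j 0 ≤ v then pvPop nums v rest else j :: rest := rfl

lemma pvTopVal_cons (nums : List Int) (j : Nat) (s : List Nat) :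
    pvTopVal nums (j :: s) = nums.getD j 0 := rfl

lemma pvLeftStep_def (nums : List Int) (s : List Nat) (acc : List Int) (i : Nat) :
    pvLeftStep nums (s, acc) i =
      (i :: pvPop nums (nums.getD i 0) s,
       acc ++ [pvTopVal nums (pvPop nums (nums.getD i 0) s)]) := rfl

lemma pvRightStep_def (nums : List Int) (s : List Nat) (acc : List Int) (i : Nat) :
    pvRightStep nums (s, acc) i =
      (i :: pvPop nums (nums.getD i 0) s,
       pvTopVal nums (pvPop nums (nums.getD i 0) s) :: acc) := rfl

-- popping elements ≤ w with w ≤ v does not change the first-(> v) scan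
lemma pvScanIdx_pop (nums : List Int) (v w : Int) (hw : w ≤ v) (s : List Nat) :
    pvScanIdx nums v (pvPop nums w s) = pvScanIdx nums v s := by
  induction s with
  | nil => rfl
  | cons j rest ih =>
    rw [pvPop_cons]
    by_cases h : nums.getD j 0 ≤ w
    · rw [if_pos h, ih, pvScanIdx_cons, if_neg (by omega)]
    · rw [if_neg h]

-- the top of the popped stack (or -1) is exactly the first stack value > v
lemma pvTopVal_pop (nums : List Int) (v : Int) (s : List Nat) :
    pvTopVal nums (pvPop nums v s) = pvScanIdx nums v s := by
  induction s with
  | nil => rfl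
  | cons j rest ih =>
    rw [pvPop_cons]
    by_cases h : nums.getD j 0 ≤ v
    · rw [if_pos h, ih, pvScanIdx_cons, if_neg (by omega)]
    · rw [if_neg h, pvTopVal_cons, pvScanIdx_cons, if_pos (by omega)]

-- take (i+1) decomposition
lemma take_succ_concat (nums : List Int) (i : Nat) (h : i < nums.length) :
    nums.take (i + 1) = nums.take i ++ [nums.getD i 0] := by
  rw [List.take_add_one, List.getElem?_eq_getElem h, List.getD_eq_getElem nums 0 h]
  rfl

-- drop m decomposition
lemma drop_cons (nums : List Int) (m : Nat) (h : m < nums.length) :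
    nums.drop m = nums.getD m 0 :: nums.drop (m + 1) := by
  rw [List.drop_eq_getElem_cons h, List.getD_eq_getElem nums 0 h]

-- LEFT pass: fold over range' m k, with a stack scan-equivalent to the reversed prefix
lemma left_fold_spec (nums : List Int) :
    ∀ (k m : Nat) (s : List Nat) (acc : List Int), m + k ≤ nums.length →
    (∀ v, pvScanIdx nums v s = pvScanFirst v ((nums.take m).reverse)) →
    ((List.range' m k).foldl (pvLeftStep nums) (s, acc)).2 =
      acc ++ (List.range' m k).map
        (fun i => pvScanFirst (nums.getD i 0) ((nums.take i).reverse)) := by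
  intro k
  induction k with
  | zero => intro m s acc _ _; simp
  | succ k ih =>
    intro m s acc hmk hs
    have hm : m < nums.length := by omega
    have htop : pvTopVal nums (pvPop nums (nums.getD m 0) s)
        = pvScanFirst (nums.getD m 0) ((nums.take m).reverse) := by
      rw [pvTopVal_pop]; exact hs _
    have hs' : ∀ v, pvScanIdx nums v (m :: pvPop nums (nums.getD m 0) s)
        = pvScanFirst v ((nums.take (m + 1)).reverse) := by
      intro v
      rw [take_succ_concat nums m hm, List.reverse_append, List.reverse_singleton,
        List.singleton_append, pvScanFirst_cons, pvScanIdx_cons]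
      by_cases h : nums.getD m 0 > v
      · rw [if_pos h, if_pos h]
      · rw [if_neg h, if_neg h, pvScanIdx_pop nums v (nums.getD m 0) (by omega), hs v]
    rw [List.range'_succ, List.foldl_cons, pvLeftStep_def,
      ih (m + 1) _ _ (by omega) hs', htop, List.map_cons, List.append_assoc,
      List.singleton_append]

-- RIGHT pass: fold over (range m).reverse, stack scan-equivalent to the drop-m suffix
lemma right_fold_spec (nums : List Int) :
    ∀ (m : Nat) (s : List Nat) (acc : List Int), m ≤ nums.length →
    (∀ v, pvScanIdx nums v s = pvScanFirst v (nums.drop m)) →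
    (((List.range m).reverse).foldl (pvRightStep nums) (s, acc)).2 =
      (List.range m).map (fun i => pvScanFirst (nums.getD i 0) (nums.drop (i + 1))) ++ acc := by
  intro m
  induction m with
  | zero => intro s acc _ _; simp
  | succ m ih =>
    intro s acc hm hs
    have hmlt : m < nums.length := by omega
    have htop : pvTopVal nums (pvPop nums (nums.getD m 0) s)
        = pvScanFirst (nums.getD m 0) (nums.drop (m + 1)) := by
      rw [pvTopVal_pop]; exact hs _
    have hs' : ∀ v, pvScanIdx nums v (m :: pvPop nums (nums.getD m 0) s)
        = pvScanFirst v (nums.drop m) := by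
      intro v
      rw [drop_cons nums m hmlt, pvScanFirst_cons, pvScanIdx_cons]
      by_cases h : nums.getD m 0 > v
      · rw [if_pos h, if_pos h]
      · rw [if_neg h, if_neg h, pvScanIdx_pop nums v (nums.getD m 0) (by omega), hs v]
    rw [List.range_succ, List.reverse_append, List.reverse_singleton, List.singleton_append,
      List.foldl_cons, pvRightStep_def, ih _ _ (by omega) hs', htop,
      List.map_append, List.append_assoc, List.map_singleton, List.singleton_append]

lemma left_fold_full (nums : List Int) :
    ((List.range nums.length).foldl (pvLeftStep nums) ([], [])).2 =
      (List.range nums.length).map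
        (fun i => pvScanFirst (nums.getD i 0) ((nums.take i).reverse)) := by
  rw [List.range_eq_range']
  rw [left_fold_spec nums nums.length 0 [] [] (by omega) (fun v => rfl), List.nil_append]

lemma right_fold_full (nums : List Int) :
    (((List.range nums.length).reverse).foldl (pvRightStep nums) ([], [])).2 =
      (List.range nums.length).map
        (fun i => pvScanFirst (nums.getD i 0) (nums.drop (i + 1))) := by
  rw [right_fold_spec nums nums.length [] [] (le_refl _)
    (by intro v; rw [List.drop_length]; rfl), List.append_nil]

lemma zipWith_add_map {α : Type} (f g : α → Int) :
    ∀ (l : List α), List.zipWith (· + ·) (l.map f) (l.map g) = l.map (fun x => f x + g x) := by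
  intro l; induction l with
  | nil => rfl
  | cons x t ih => simp [ih]

-- ===== VERDICT (by name: the statement is the Claim_ definition above) =====
theorem find_sum_of_nearest_ge_spec : Claim_equal_find_sum_of_nearest_ge := by
  intro nums _
  unfold Spec_find_sum_of_nearest_ge
  show (List.zipWith (· + ·) ((List.range nums.length).foldl (pvLeftStep nums) ([], [])).2
        (((List.range nums.length).reverse).foldl (pvRightStep nums) ([], [])).2).foldl
          (· + ·) 0
      = find_sum_of_nearest_ge_alt nums
  rw [left_fold_full, right_fold_full, zipWith_add_map, List.foldl_map]
  rfl
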